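-- pv_equiv track=rewrite | github.com/Ikerlb/AoC2021 | 1/sol.py | solve
-- ===== SOURCE A (Python) =====
-- def solve(l, k):
--     s = sum(l[:k])
--     res = 0
--     for i in range(k, len(l)):
--         ss = s - l[i - k] + l[i]
--         res += s < ss
--         s = ss
--     return res
-- ===== SOURCE B (Python) =====
-- def solve(l, k):
--     # simpler: a window sum increases iff the element entering exceeds the one leaving
--     return sum(1 for i in range(k, len(l)) if l[i] > l[i - k])
-- ===== Notes on version B (the rewrite author's own statement) =====
-- stated objective: simpler
-- what changed: Replaces the running window-sum accumulator with a stateless pairwise count: a window increases iff l[i] > l[i-k], so B counts those positions directly and never computes sum(l[:k]) or carries state.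
import Mathlib
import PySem

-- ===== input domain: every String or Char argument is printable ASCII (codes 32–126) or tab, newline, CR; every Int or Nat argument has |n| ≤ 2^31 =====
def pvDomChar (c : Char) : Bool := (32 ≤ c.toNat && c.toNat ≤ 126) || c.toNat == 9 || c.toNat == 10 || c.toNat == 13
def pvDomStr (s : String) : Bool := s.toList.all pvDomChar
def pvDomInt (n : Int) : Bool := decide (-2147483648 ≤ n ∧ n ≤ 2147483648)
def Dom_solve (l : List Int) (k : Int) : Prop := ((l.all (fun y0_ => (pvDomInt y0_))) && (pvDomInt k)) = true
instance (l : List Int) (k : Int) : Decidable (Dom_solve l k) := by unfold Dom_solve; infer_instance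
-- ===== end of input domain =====

-- B replaces A's running window-sum accumulator with a stateless pairwise count (l[i] > l[i-k]); objective: simpler.


-- ===== PORT A =====
-- s = sum(l[:k]); res = 0; for i in range(k, len(l)): ss = s - l[i-k] + l[i]; res += s < ss; s = ss
def solve (l : List Int) (k : Int) : Int :=
  let s0 : Int := (PySem.List.slice l none (some k)).sum
  let r := (PySem.List.pyRange k (l.length : Int) 1).foldl
    (fun (st : Int × Int) i =>
      let ss := st.1 - PySem.List.pyGetD l (i - k) 0 + PySem.List.pyGetD l i 0
      (ss, st.2 + (if st.1 < ss then 1 else 0)))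
    (s0, 0)
  r.2

-- ===== PORT B =====
-- sum(1 for i in range(k, len(l)) if l[i] > l[i-k])
def solve_alt (l : List Int) (k : Int) : Int :=
  ((PySem.List.pyRange k (l.length : Int) 1).map
    (fun i => if PySem.List.pyGetD l (i - k) 0 < PySem.List.pyGetD l i 0 then (1 : Int) else 0)).sum

-- ===== PRECONDITION & SPEC =====
-- Pre_ excludes k < 0, on which the Python A (and B) always raises IndexError: the loop's
-- last iteration reads l[len(l)-1-k] with index ≥ len(l).
def Pre_solve (l : List Int) (k : Int) : Prop := 0 ≤ k
instance (l : List Int) (k : Int) : Decidable (Pre_solve l k) := by unfold Pre_solve; infer_instance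
def pvWitness_solve : List Int × Int := ([1, 5, 2, 7], 2)

def Spec_solve (l : List Int) (k : Int) (out : Int) : Prop := out = solve_alt l k
instance (l : List Int) (k : Int) (out : Int) : Decidable (Spec_solve l k out) := by unfold Spec_solve; infer_instance

-- ===== CLAIM (what is proved, stated in full; the proofs are below) =====
def Claim_equal_solve : Prop := ∀ (l : List Int) (k : Int), Dom_solve l k → Pre_solve l k → Spec_solve l k (solve l k)

-- ===== LEMMAS AND PROOFS =====
-- The increment condition s < s - a + b is independent of the carried sum s, so the fold's
-- second component is the pairwise count, whatever the first component holds.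
theorem solve_fold_snd (l : List Int) (k : Int) (is : List Int) (s r : Int) :
    (is.foldl
      (fun (st : Int × Int) i =>
        let ss := st.1 - PySem.List.pyGetD l (i - k) 0 + PySem.List.pyGetD l i 0
        (ss, st.2 + (if st.1 < ss then 1 else 0)))
      (s, r)).2
    = r + (is.map (fun i => if PySem.List.pyGetD l (i - k) 0 < PySem.List.pyGetD l i 0 then (1 : Int) else 0)).sum := by
  induction is generalizing s r with
  | nil => simp
  | cons i is ih =>
    simp only [List.foldl_cons, List.map_cons, List.sum_cons]
    rw [ih]
    have : (s < s - PySem.List.pyGetD l (i - k) 0 + PySem.List.pyGetD l i 0)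
        ↔ (PySem.List.pyGetD l (i - k) 0 < PySem.List.pyGetD l i 0) := by omega
    simp only [this]
    ring

-- ===== VERDICT (by name: the statement is the Claim_ definition above) =====
theorem solve_spec : Claim_equal_solve := by
  intro l k _ _
  unfold Spec_solve solve solve_alt
  rw [solve_fold_snd]
  ring
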